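-- pv_equiv track=rewrite | github.com/plooi/DerivativeEvaluator | derivative_evaluator.py | find_mult_term_end
-- ===== SOURCE A (Python) =====
-- def find_close(open_paren, string):
--     if string[open_paren] != "(":
--         raise Exception("bad")
--     i = open_paren
--     paren_level = 0
--     while i < len(string):
--         if string[i] == "(": paren_level += 1
--         if string[i] == ")": paren_level -= 1
--
--         if paren_level == 0: return i
--         i += 1
--     fail("No close paren for %d, %s" % (open_paren, string))
--
-- def find_mult_term_end(string, start):
--     i = start
--     while i < len(string):
--         if string[i] not in ["+","-"]:
--             break
--         i += 1
--
--     while i < len(string):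
--         if string[i] == "(":
--             i = find_close(i, string)+1
--             continue
--         if string[i] in ["+", "-", "*", "/", ")"]:
--             break
--         i += 1
--     return i
--
-- def fail(msg):
--     raise Exception(msg)
-- ===== SOURCE B (Python) =====
-- def find_mult_term_end(string, start):
--     i = start
--     n = len(string)
--     while i < n and string[i] in "+-":
--         i += 1
--     depth = 0
--     while i < n:
--         c = string[i]
--         if depth == 0 and c in "+-*/)":
--             break
--         if c == "(":
--             depth += 1
--         elif c == ")":
--             depth -= 1
--         i += 1
--     if depth > 0:
--         raise Exception("No close paren in %s" % string)
--     return i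
-- ===== Notes on version B (the rewrite author's own statement) =====
-- stated objective: simpler
-- what changed: Replaced the find_close helper and its paren-jumping (restarting a nested counting loop at every '(') with one linear scan that keeps a single paren-depth counter, checking the top-level terminator before adjusting depth; the helper function disappears.
import Mathlib
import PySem

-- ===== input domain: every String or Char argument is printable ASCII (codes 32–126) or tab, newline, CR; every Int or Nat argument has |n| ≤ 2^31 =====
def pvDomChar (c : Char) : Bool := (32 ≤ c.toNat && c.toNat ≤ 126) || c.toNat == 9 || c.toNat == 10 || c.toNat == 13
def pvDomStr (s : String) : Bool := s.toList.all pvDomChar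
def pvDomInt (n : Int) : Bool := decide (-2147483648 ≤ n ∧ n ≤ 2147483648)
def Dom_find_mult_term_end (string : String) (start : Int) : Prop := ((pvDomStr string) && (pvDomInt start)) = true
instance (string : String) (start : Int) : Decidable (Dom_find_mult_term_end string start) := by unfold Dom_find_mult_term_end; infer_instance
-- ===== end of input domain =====

-- B replaces A's find_close helper and its paren-jumping with one linear scan keeping a paren-depth counter (simpler decomposition);
-- inputs on which both Pythons raise (unclosed paren / index error) are outside Pre_, return values agree everywhere else.
-- Each while-loop is ported with a Nat fuel = number of loop iterations left ((n - i).toNat at entry), a pure totality guard: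
-- with that fuel the 0-branch is reached exactly when the while-condition i < n fails, so each port is exact on every input.

-- ===== PORT A =====
-- the two sequential 'if's updating paren_level in find_close's loop body
def pvLevelStep (c : Char) (level : Int) : Int :=
  if c = ')' then (if c = '(' then level + 1 else level) - 1 else (if c = '(' then level + 1 else level)

-- while-loop of find_close; none = an exception (IndexError, or the fail(...) at loop exhaustion)
def pvFcLoop (s : List Char) (n : Int) : Nat → Int → Int → Option Int
  | 0, _, _ => none
  | fuel + 1, i, level =>
    if i < n then
      match PySem.List.pyGet? s i with
      | none => none
      | some c => if pvLevelStep c level = 0 then some i else pvFcLoop s n fuel (i + 1) (pvLevelStep c level)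
    else none

-- find_close; none = an exception (the "bad" raise, IndexError, or the fail path)
def pvFindClose (openP : Int) (s : List Char) : Option Int :=
  match PySem.List.pyGet? s openP with
  | none => none
  | some c => if c = '(' then pvFcLoop s (s.length : Int) (((s.length : Int) - openP).toNat) openP 0 else none

-- first while-loop of find_mult_term_end: skip leading '+'/'-'
def pvSkipA (s : List Char) (n : Int) : Nat → Int → Option Int
  | 0, i => some i
  | fuel + 1, i =>
    if i < n then
      match PySem.List.pyGet? s i with
      | none => none
      | some c => if c = '+' ∨ c = '-' then pvSkipA s n fuel (i + 1) else some i
    else some i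

-- second while-loop of find_mult_term_end
def pvScanA (s : List Char) (n : Int) : Nat → Int → Option Int
  | 0, i => some i
  | fuel + 1, i =>
    if i < n then
      match PySem.List.pyGet? s i with
      | none => none
      | some c =>
        if c = '(' then
          match pvFindClose i s with
          | none => none
          | some r => pvScanA s n fuel (r + 1)
        else if c ∈ (['+', '-', '*', '/', ')'] : List Char) then some i
        else pvScanA s n fuel (i + 1)
    else some i

def find_mult_term_end (string : String) (start : Int) : Int :=
  (((pvSkipA string.toList (string.toList.length : Int) (((string.toList.length : Int) - start).toNat) start).bind
      (fun i => pvScanA string.toList (string.toList.length : Int) (((string.toList.length : Int) - i).toNat) i)).getD 0)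

-- ===== PORT B =====
-- B's first while-loop: while i < n and string[i] in "+-"
def pvSkipB (s : List Char) (n : Int) : Nat → Int → Option Int
  | 0, i => some i
  | fuel + 1, i =>
    if i < n then
      match PySem.List.pyGet? s i with
      | none => none
      | some c => if c = '+' ∨ c = '-' then pvSkipB s n fuel (i + 1) else some i
    else some i

-- B's single scan loop carrying (i, depth); returns the loop-exit state, none = IndexError
def pvScanB (s : List Char) (n : Int) : Nat → Int → Int → Option (Int × Int)
  | 0, i, depth => some (i, depth)
  | fuel + 1, i, depth =>
    if i < n then
      match PySem.List.pyGet? s i with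
      | none => none
      | some c =>
        if depth = 0 ∧ c ∈ (['+', '-', '*', '/', ')'] : List Char) then some (i, depth)
        else pvScanB s n fuel (i + 1) (if c = '(' then depth + 1 else if c = ')' then depth - 1 else depth)
    else some (i, depth)

-- B's post-loop check: 'if depth > 0: raise' (none) else return i
def pvCheckB (p : Int × Int) : Option Int := if p.2 > 0 then none else some p.1

def find_mult_term_end_alt (string : String) (start : Int) : Int :=
  (((pvSkipB string.toList (string.toList.length : Int) (((string.toList.length : Int) - start).toNat) start).bind
      (fun i => (pvScanB string.toList (string.toList.length : Int) (((string.toList.length : Int) - i).toNat) i 0).bind pvCheckB)).getD 0)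

-- ===== PRECONDITION & SPEC =====
-- paren depth of the first q characters of t
def pvDep (t : List Char) (q : Nat) : Int := (((t.take q).count '(' : Int)) - (((t.take q).count ')' : Int))
-- the characters A's loops read, in order (a negative start wraps, as Python's s[i] does)
def pvScanChars (s : List Char) (start : Int) : List Char :=
  if 0 ≤ start then s.drop start.toNat else s.drop (s.length + start).toNat ++ s
-- every '(' the top-level scan of t reaches has a matching close (Bool so that Pre_ is decidable by computation)
def pvScanOK (t : List Char) : Bool :=
  (List.range t.length).all fun q =>
    !(t.getD q ' ' == '(' && pvDep t q == 0 &&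
        (List.range q).all fun q' => !(pvDep t q' == 0 && (['+', '-', '*', '/', ')'] : List Char).contains (t.getD q' ' '))) ||
    (List.range (t.length + 1)).any fun r =>
      decide (q < r) && ((t.drop q).take (r - q)).count '(' == ((t.drop q).take (r - q)).count ')'
-- Pre_ = exactly the inputs on which the Python A returns: start ≥ -len(string) (otherwise string[start]
-- raises IndexError), and the top-level scan never reaches an unclosed '(' (otherwise find_close's fail
-- raises an Exception). B raises on exactly the same inputs.
def Pre_find_mult_term_end (string : String) (start : Int) : Prop :=
  -(string.toList.length : Int) ≤ start ∧
    pvScanOK ((pvScanChars string.toList start).dropWhile (fun c => c = '+' || c = '-')) = true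
instance (string : String) (start : Int) : Decidable (Pre_find_mult_term_end string start) := by
  unfold Pre_find_mult_term_end; infer_instance
def pvWitness_find_mult_term_end : String × Int := ("(x+1)*2", 0)

def Spec_find_mult_term_end (string : String) (start : Int) (out : Int) : Prop := out = find_mult_term_end_alt string start
instance (string : String) (start : Int) (out : Int) : Decidable (Spec_find_mult_term_end string start out) := by unfold Spec_find_mult_term_end; infer_instance

-- ===== CLAIM (what is proved, stated in full; the proofs are below) =====
def Claim_equal_find_mult_term_end : Prop := ∀ (string : String) (start : Int), Dom_find_mult_term_end string start → Pre_find_mult_term_end string start → Spec_find_mult_term_end string start (find_mult_term_end string start)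

-- ===== LEMMAS AND PROOFS =====
-- find_close's loop never returns an index below its argument (any fuel)
theorem pvFcLoop_ge (s : List Char) (n : Int) :
    ∀ (fuel : Nat) (i level r : Int), pvFcLoop s n fuel i level = some r → i ≤ r := by
  intro fuel
  induction fuel with
  | zero => intro i level r h; simp [pvFcLoop] at h
  | succ m ih =>
    intro i level r h
    rw [pvFcLoop] at h
    by_cases hi : i < n
    · rw [if_pos hi] at h
      cases hg : PySem.List.pyGet? s i with
      | none => rw [hg] at h; simp at h
      | some c =>
        rw [hg] at h; simp only [] at h
        by_cases hz : pvLevelStep c level = 0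
        · rw [if_pos hz] at h; simp at h; omega
        · rw [if_neg hz] at h; have := ih _ _ _ h; omega
    · rw [if_neg hi] at h; simp at h

theorem pvFindClose_ge (openP : Int) (s : List Char) (r : Int)
    (h : pvFindClose openP s = some r) : openP ≤ r := by
  unfold pvFindClose at h
  cases hg : PySem.List.pyGet? s openP with
  | none => rw [hg] at h; simp at h
  | some c =>
    rw [hg] at h; simp only [] at h
    by_cases hc : c = '('
    · rw [if_pos hc] at h; exact pvFcLoop_ge _ _ _ _ _ _ h
    · rw [if_neg hc] at h; simp at h

-- the two skip loops are the same loop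
theorem pvSkip_eq (s : List Char) (n : Int) :
    ∀ (fuel : Nat) (i : Int), pvSkipA s n fuel i = pvSkipB s n fuel i := by
  intro fuel
  induction fuel with
  | zero => intro i; rfl
  | succ m ih =>
    intro i
    rw [pvSkipA, pvSkipB]
    by_cases hi : i < n
    · rw [if_pos hi, if_pos hi]
      cases hg : PySem.List.pyGet? s i with
      | none => rfl
      | some c =>
        simp only []
        by_cases hc : c = '+' ∨ c = '-'
        · rw [if_pos hc, if_pos hc, ih]
        · rw [if_neg hc, if_neg hc]
    · rw [if_neg hi, if_neg hi]

-- A's scan loop result does not depend on the fuel, as long as it covers the remaining iterations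
theorem pvScanA_fuel (s : List Char) (n : Int) :
    ∀ (f g : Nat) (i : Int), (n - i).toNat ≤ f → (n - i).toNat ≤ g →
      pvScanA s n f i = pvScanA s n g i := by
  intro f
  induction f with
  | zero =>
    intro g i hf hg
    have hi : ¬ i < n := by omega
    cases g with
    | zero => rfl
    | succ m => rw [pvScanA, pvScanA, if_neg hi]
  | succ m ih =>
    intro g i hf hg
    cases g with
    | zero =>
      have hi : ¬ i < n := by omega
      rw [pvScanA, pvScanA, if_neg hi]
    | succ m' =>
      rw [pvScanA]
      conv_rhs => rw [pvScanA]
      by_cases hi : i < n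
      · rw [if_pos hi, if_pos hi]
        cases hg' : PySem.List.pyGet? s i with
        | none => rfl
        | some c =>
          simp only []
          by_cases hc : c = '('
          · rw [if_pos hc, if_pos hc]
            cases hr : pvFindClose i s with
            | none => rfl
            | some r =>
              simp only []
              have hge := pvFindClose_ge i s r hr
              exact ih m' (r + 1) (by omega) (by omega)
          · rw [if_neg hc, if_neg hc]
            by_cases hb : c ∈ (['+', '-', '*', '/', ')'] : List Char)
            · rw [if_pos hb, if_pos hb]
            · rw [if_neg hb, if_neg hb]
              exact ih m' (i + 1) (by omega) (by omega)
      · rw [if_neg hi, if_neg hi]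

-- B's depth update equals find_close's two-step level update
theorem pvChain_eq_step (c : Char) (d : Int) :
    (if c = '(' then d + 1 else if c = ')' then d - 1 else d) = pvLevelStep c d := by
  by_cases h1 : c = '('
  · subst h1; simp [pvLevelStep]
  · by_cases h2 : c = ')' <;> simp [pvLevelStep, h1, h2]

theorem pvLevelStep_ge (c : Char) (d : Int) (hd : 1 ≤ d) (hz : pvLevelStep c d ≠ 0) : 1 ≤ pvLevelStep c d := by
  unfold pvLevelStep at hz ⊢; split_ifs at hz ⊢ <;> omega

-- inside parentheses (depth ≥ 1) B's scan follows find_close's loop exactly (exact fuels on both sides)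
theorem pvScan_pos (s : List Char) (n : Int) :
    ∀ (k : Nat) (i d : Int), (n - i).toNat = k → 1 ≤ d →
      (pvScanB s n k i d).bind pvCheckB =
        (pvFcLoop s n k i d).bind
          (fun r => (pvScanB s n ((n - (r + 1)).toNat) (r + 1) 0).bind pvCheckB) := by
  intro k
  induction k with
  | zero =>
    intro i d hk hd
    rw [pvScanB, pvFcLoop]
    simp [pvCheckB]
    omega
  | succ m ih =>
    intro i d hk hd
    have hi : i < n := by omega
    rw [pvScanB, pvFcLoop, if_pos hi, if_pos hi]
    cases hg : PySem.List.pyGet? s i with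
    | none => rfl
    | some c =>
      simp only []
      rw [if_neg (by intro hx; omega)]
      rw [pvChain_eq_step]
      by_cases hz : pvLevelStep c d = 0
      · rw [if_pos hz, hz]
        have hm : (n - (i + 1)).toNat = m := by omega
        simp only [Option.bind_some]
        rw [← hm]
      · rw [if_neg hz]
        exact ih (i + 1) (pvLevelStep c d) (by omega) (pvLevelStep_ge c d hd hz)

-- at top level (depth 0) B's scan follows A's scan loop (exact fuels)
theorem pvScan_eq (s : List Char) (n : Int) (hn : n = (s.length : Int)) :
    ∀ (k : Nat) (i : Int), (n - i).toNat = k →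
      pvScanA s n k i = (pvScanB s n k i 0).bind pvCheckB := by
  intro k
  induction k using Nat.strong_induction_on with
  | _ k IH =>
    intro i hk
    cases k with
    | zero => rw [pvScanA, pvScanB]; simp [pvCheckB]
    | succ m =>
      have hi : i < n := by omega
      rw [pvScanA, pvScanB, if_pos hi, if_pos hi]
      cases hg : PySem.List.pyGet? s i with
      | none => rfl
      | some c =>
        simp only []
        by_cases hc : c = '('
        · subst hc
          rw [if_pos (by trivial)]
          rw [if_neg (by intro hx; simpa using hx.2)]
          rw [show (if '(' = '(' then (0 : Int) + 1 else if '(' = ')' then (0 : Int) - 1 else 0) = 1 by decide]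
          have hm : (n - (i + 1)).toNat = m := by omega
          rw [pvScan_pos s n m (i + 1) 1 hm le_rfl]
          have hfc : pvFindClose i s = pvFcLoop s n m (i + 1) 1 := by
            unfold pvFindClose
            rw [hg]; simp only []
            rw [if_pos (by trivial), ← hn, hk, pvFcLoop, if_pos hi, hg]
            simp only []
            rw [show pvLevelStep '(' 0 = 1 by decide]
            rw [if_neg (by decide)]
          rw [← hfc]
          cases hr : pvFindClose i s with
          | none => rfl
          | some r =>
            simp only [Option.bind_some]
            have hge : i ≤ r := pvFindClose_ge i s r hr
            rw [pvScanA_fuel s n m ((n - (r + 1)).toNat) (r + 1) (by omega) le_rfl]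
            exact IH ((n - (r + 1)).toNat) (by omega) (r + 1) rfl
        · rw [if_neg hc]
          by_cases hb : c ∈ (['+', '-', '*', '/', ')'] : List Char)
          · rw [if_pos hb, if_pos ⟨by trivial, hb⟩]
            simp [pvCheckB]
          · rw [if_neg hb]
            rw [if_neg (by intro hx; exact hb hx.2)]
            rw [show (if c = '(' then (0 : Int) + 1 else if c = ')' then (0 : Int) - 1 else 0) = 0 by
              rw [if_neg hc, if_neg (by intro h'; exact hb (by rw [h']; decide))]]
            have hm : (n - (i + 1)).toNat = m := by omega
            exact IH m (by omega) (i + 1) hm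

-- the two programs return the same integer on every input (exceptions, encoded none, also coincide)
theorem pv_main_eq (string : String) (start : Int) :
    find_mult_term_end string start = find_mult_term_end_alt string start := by
  unfold find_mult_term_end find_mult_term_end_alt
  rw [pvSkip_eq]
  cases pvSkipB string.toList (string.toList.length : Int)
      (((string.toList.length : Int) - start).toNat) start with
  | none => rfl
  | some i =>
    show (pvScanA string.toList (string.toList.length : Int)
        (((string.toList.length : Int) - i).toNat) i).getD 0 =
      ((pvScanB string.toList (string.toList.length : Int)
        (((string.toList.length : Int) - i).toNat) i 0).bind pvCheckB).getD 0
    rw [pvScan_eq string.toList (string.toList.length : Int) rfl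
        (((string.toList.length : Int) - i).toNat) i rfl]

-- ===== VERDICT (by name: the statement is the Claim_ definition above) =====
theorem find_mult_term_end_spec : Claim_equal_find_mult_term_end := by
  intro string start _ _
  unfold Spec_find_mult_term_end
  exact pv_main_eq string start
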